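-- pv_equiv track=rewrite | github.com/Arin0421/Algorithm | programmers/lv1/모의고사.py | solution
-- ===== SOURCE A (Python) =====
-- def solution(answers):
--     answer = []
--     st1=[1,2,3,4,5]
--     st2=[2,1,2,3,2,4,2,5]
--     st3=[3,3,1,1,2,2,4,4,5,5]
--     sol1,sol2,sol3=0,0,0
--
--     for i in range(len(answers)):
--         s1=i%5
--         s2=i%8
--         s3=i%10
--
--         if st1[s1]==answers[i]:
--             sol1+=1
--         if st2[s2]==answers[i]:
--             sol2+=1
--         if st3[s3]==answers[i]:
--             sol3+=1
--
--     k=max(sol1,sol2,sol3)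
--     if k==sol1:
--         answer.append(1)
--     if k==sol2:
--         answer.append(2)
--     if k==sol3:
--         answer.append(3)
--
--     return answer
-- ===== SOURCE B (Python) =====
-- def solution(answers):
--     patterns = [[1, 2, 3, 4, 5],
--                 [2, 1, 2, 3, 2, 4, 2, 5],
--                 [3, 3, 1, 1, 2, 2, 4, 4, 5, 5]]
--     # For each pattern, score by pattern POSITION: the answers a position-j guess
--     # meets are exactly the strided slice answers[j::len(p)], so its contribution
--     # is that slice's count of the guessed value.  No per-answer cyclic scan.
--     scores = [sum(answers[j::len(p)].count(g) for j, g in enumerate(p))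
--               for p in patterns]
--     m = max(scores)
--     return [i + 1 for i in range(3) if scores[i] == m]
-- ===== Notes on version B (the rewrite author's own statement) =====
-- stated objective: alternative
-- what changed: Instead of A's single per-answer loop comparing answers[i] with table lookups at i%5/i%8/i%10 into three running counters, B iterates over pattern POSITIONS: each pattern position j meets exactly the strided slice answers[j::len(p)], so its score is the sum of slice counts of the guessed value; then a uniform max-then-collect over range(3).
import Mathlib
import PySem

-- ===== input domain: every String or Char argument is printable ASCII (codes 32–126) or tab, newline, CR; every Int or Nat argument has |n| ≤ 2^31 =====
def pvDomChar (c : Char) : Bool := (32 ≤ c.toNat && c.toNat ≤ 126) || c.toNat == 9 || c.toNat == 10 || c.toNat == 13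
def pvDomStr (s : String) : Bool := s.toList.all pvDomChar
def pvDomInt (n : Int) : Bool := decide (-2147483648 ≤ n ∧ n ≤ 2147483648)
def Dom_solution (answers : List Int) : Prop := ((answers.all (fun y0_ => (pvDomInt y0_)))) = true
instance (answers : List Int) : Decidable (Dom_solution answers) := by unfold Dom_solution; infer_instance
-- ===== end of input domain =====

-- B replaces A's per-answer index loop (i%5/i%8/i%10 lookups into three running counters) by a
-- per-pattern-POSITION decomposition: position j's contribution is the count of the guessed
-- value in the strided slice answers[j::len(p)] (alternative; same asymptotic cost).

-- ===== PORT A =====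
def solution (answers : List Int) : List Int :=
  let st1 : List Int := [1, 2, 3, 4, 5]
  let st2 : List Int := [2, 1, 2, 3, 2, 4, 2, 5]
  let st3 : List Int := [3, 3, 1, 1, 2, 2, 4, 4, 5, 5]
  let s := (List.range answers.length).foldl (fun (acc : Int × Int × Int) (i : Nat) =>
      ((if (PySem.List.pyGet? st1 (↑(i % 5) : Int)).getD 0
            == (PySem.List.pyGet? answers (↑i : Int)).getD 0 then acc.1 + 1 else acc.1),
       (if (PySem.List.pyGet? st2 (↑(i % 8) : Int)).getD 0
            == (PySem.List.pyGet? answers (↑i : Int)).getD 0 then acc.2.1 + 1 else acc.2.1),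
       (if (PySem.List.pyGet? st3 (↑(i % 10) : Int)).getD 0
            == (PySem.List.pyGet? answers (↑i : Int)).getD 0 then acc.2.2 + 1 else acc.2.2)))
    (0, 0, 0)
  let k := max s.1 (max s.2.1 s.2.2)
  ((if k == s.1 then [1] else []) ++ (if k == s.2.1 then [2] else [])) ++
    (if k == s.2.2 then [3] else [])

-- ===== PORT B =====
def solution_alt (answers : List Int) : List Int :=
  let patterns : List (List Int) :=
    [[1, 2, 3, 4, 5], [2, 1, 2, 3, 2, 4, 2, 5], [3, 3, 1, 1, 2, 2, 4, 4, 5, 5]]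
  -- sum(answers[j::len(p)].count(g) for j, g in enumerate(p)), for each pattern p
  let scores := patterns.map (fun p =>
    (PySem.List.enumerate p 0).foldl
      (fun s jg =>
        s + (((PySem.List.slice? answers (some jg.1) none (↑p.length : Int)).getD []).count jg.2 : Int))
      0)
  let m := (PySem.List.max? scores (fun y => y)).getD 0
  (PySem.List.pyRange 0 3 1).foldl
    (fun acc i => if (PySem.List.pyGet? scores i).getD 0 == m then acc ++ [i + 1] else acc) []

-- ===== PRECONDITION & SPEC =====
def Spec_solution (answers : List Int) (out : List Int) : Prop := out = solution_alt answers
instance (answers : List Int) (out : List Int) : Decidable (Spec_solution answers out) := by unfold Spec_solution; infer_instance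

-- ===== CLAIM (what is proved, stated in full; the proofs are below) =====
def Claim_equal_solution : Prop := ∀ (answers : List Int), Dom_solution answers → Spec_solution answers (solution answers)

-- ===== LEMMAS AND PROOFS =====

-- the strided subsequence xs[j::L], structurally
def pvStride : List Int → Nat → Nat → List Int
  | [], _, _ => []
  | x :: t, 0, L => x :: pvStride t (L - 1) L
  | _ :: t, j + 1, L => pvStride t j L

-- B's per-pattern sum, recursively over the pattern with a position offset
def pvT (xs : List Int) (L : Nat) : Nat → List Int → Int
  | _, [] => 0
  | s, g :: q => ((pvStride xs s L).count g : Int) + pvT xs L (s + 1) q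

-- A's per-pattern score: matches of xs[i] against p[i % len(p)]
def pvACount (xs p : List Int) : Int :=
  ((List.range xs.length).countP (fun i =>
    (PySem.List.pyGet? p (↑(i % p.length) : Int)).getD 0
      == (PySem.List.pyGet? xs (↑i : Int)).getD 0) : Int)

theorem pvFoldl_prod3 {β : Type} (f1 f2 f3 : Int → β → Int) (l : List β) (a b c : Int) :
    l.foldl (fun s e => (f1 s.1 e, f2 s.2.1 e, f3 s.2.2 e)) (a, b, c)
      = (l.foldl f1 a, l.foldl f2 b, l.foldl f3 c) := by
  induction l generalizing a b c with
  | nil => rfl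
  | cons x t ih => simpa using ih (f1 a x) (f2 b x) (f3 c x)

-- slice? with a Nat start, no stop and positive Nat step, in closed form
theorem pvSliceClosed (xs : List Int) (j L : Nat) (hL : 0 < L) :
    PySem.List.slice? xs (some (↑j : Int)) none (↑L : Int)
      = some ((List.range ((xs.length - min j xs.length + L - 1) / L)).filterMap
          (fun k => xs[min j xs.length + L * k]?)) := by
  have hstep : (↑L : Int) ≠ 0 := by exact_mod_cast Nat.pos_iff_ne_zero.mp hL
  have hnotlt : ¬ ((↑L : Int) < 0) := by omega
  have hpos : (0 : Int) < ↑L := by exact_mod_cast hL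
  have hjlt : ¬ ((↑j : Int) < 0) := by omega
  simp only [PySem.List.slice?, PySem.List.sliceIndices, hstep, hnotlt, if_false, hpos, if_true,
    hjlt, ← Nat.cast_min, ← Nat.cast_mul, ← Nat.cast_add, Int.toNat_natCast]
  congr 2
  by_cases hmn : min j xs.length < xs.length
  · rw [if_pos (by exact_mod_cast hmn)]
    have hnum : (↑xs.length - ↑(min j xs.length) + ↑L - 1 : Int)
        = ↑(xs.length - min j xs.length + L - 1) := by
      have := Nat.min_le_right j xs.length
      omega
    rw [hnum, Int.ofNat_ediv_ofNat, Int.toNat_natCast]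
  · rw [if_neg (by exact_mod_cast hmn)]
    have he : min j xs.length = xs.length := by
      have := Nat.min_le_right j xs.length
      omega
    rw [he, Nat.sub_self, Nat.zero_add]
    rw [Nat.div_eq_of_lt (by omega)]

-- pvStride matches that closed form
theorem pvStrideClosed (L : Nat) (hL : 0 < L) : ∀ (xs : List Int) (j : Nat),
    pvStride xs j L
      = (List.range ((xs.length - min j xs.length + L - 1) / L)).filterMap
          (fun k => xs[min j xs.length + L * k]?) := by
  intro xs
  induction xs with
  | nil =>
    intro j
    simp only [pvStride, List.length_nil, Nat.min_zero, Nat.sub_zero, Nat.zero_add]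
    rw [Nat.div_eq_of_lt (by omega)]
    simp
  | cons x t ih =>
    intro j
    cases j with
    | zero =>
      have hmin : min 0 (t.length + 1) = 0 := Nat.zero_min _
      simp only [pvStride, List.length_cons, hmin, Nat.sub_zero, Nat.zero_add]
      have hcnt : (t.length + 1 + L - 1) / L = t.length / L + 1 := by
        have e : t.length + 1 + L - 1 = t.length + L := by omega
        rw [e, Nat.add_div_right _ hL]
      rw [hcnt, List.range_succ_eq_map]
      simp only [List.filterMap_cons, Nat.mul_zero, List.getElem?_cons_zero, List.filterMap_map]
      congr 1
      by_cases hbig : L - 1 ≤ t.length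
      · have hmin' : min (L - 1) t.length = L - 1 := Nat.min_eq_left hbig
        have hcnt' : (t.length - (L - 1) + L - 1) / L = t.length / L := by
          congr 1; omega
        rw [ih (L - 1), hmin', hcnt']
        have hfun : ((fun m => (x :: t)[L * m]?) ∘ Nat.succ) = (fun k => t[L - 1 + L * k]?) := by
          funext k
          simp only [Function.comp_apply]
          have h1 : L * Nat.succ k = (L - 1 + L * k) + 1 := by
            have := Nat.mul_succ L k; omega
          rw [h1, List.getElem?_cons_succ]
        rw [hfun]
      · have hmin' : min (L - 1) t.length = t.length := Nat.min_eq_right (by omega)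
        have hz : t.length / L = 0 := Nat.div_eq_of_lt (by omega)
        have hz' : (t.length - min (L - 1) t.length + L - 1) / L = 0 := by
          rw [hmin', Nat.sub_self]; exact Nat.div_eq_of_lt (by omega)
        rw [ih (L - 1), hz, hz']
        simp
    | succ j' =>
      have hmin : min (j' + 1) (t.length + 1) = min j' t.length + 1 := Nat.succ_min_succ _ _
      simp only [pvStride, List.length_cons, hmin]
      have hcnt : (t.length + 1 - (min j' t.length + 1) + L - 1) / L
          = (t.length - min j' t.length + L - 1) / L := by congr 1; omega
      rw [hcnt, ih j']
      have hfun : (fun k => (x :: t)[min j' t.length + 1 + L * k]?)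
          = (fun k => t[min j' t.length + L * k]?) := by
        funext k
        have h1 : min j' t.length + 1 + L * k = (min j' t.length + L * k) + 1 := by omega
        rw [h1, List.getElem?_cons_succ]
      rw [hfun]

theorem pvSlice_eq_stride (xs : List Int) (j L : Nat) (hL : 0 < L) :
    PySem.List.slice? xs (some (↑j : Int)) none (↑L : Int) = some (pvStride xs j L) := by
  rw [pvSliceClosed xs j L hL, pvStrideClosed L hL xs j]

theorem pvT_shift (x : Int) (xs : List Int) (L : Nat) (q : List Int) : ∀ (s : Nat),
    pvT (x :: xs) L (s + 1) q = pvT xs L s q := by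
  induction q with
  | nil => intro s; rfl
  | cons g q ih => intro s; simp only [pvT, pvStride]; rw [ih (s + 1)]

theorem pvT_nil (L : Nat) (q : List Int) : ∀ s, pvT [] L s q = 0 := by
  induction q with
  | nil => intro s; rfl
  | cons g q ih => intro s; simp [pvT, pvStride, ih]

theorem pvT_append (xs : List Int) (L : Nat) (q : List Int) (g : Int) : ∀ (s : Nat),
    pvT xs L s (q ++ [g]) = pvT xs L s q + ((pvStride xs (s + q.length) L).count g : Int) := by
  induction q with
  | nil => intro s; simp [pvT]
  | cons h q ih =>
    intro s
    simp only [List.cons_append, pvT, ih (s + 1), List.length_cons]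
    have e : s + 1 + q.length = s + (q.length + 1) := by omega
    rw [e]; ring

-- rotating the pattern matches shifting the answer index
theorem pvRotGet (q : List Int) (g : Int) (i : Nat) :
    (q ++ [g])[i % (q.length + 1)]? = (g :: q)[(i + 1) % (q.length + 1)]? := by
  have key : (i + 1) % (q.length + 1) = (i % (q.length + 1) + 1) % (q.length + 1) := by
    conv_lhs => rw [Nat.add_mod]
    conv_rhs => rw [Nat.add_mod (i % (q.length + 1))]
    rw [Nat.mod_mod_of_dvd _ dvd_rfl]
  have hm : i % (q.length + 1) < q.length + 1 := Nat.mod_lt _ (by omega)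
  by_cases h : i % (q.length + 1) = q.length
  · rw [key, h, Nat.mod_self]
    rw [List.getElem?_append_right (le_refl _)]
    simp
  · have hlt : i % (q.length + 1) < q.length := by omega
    have h2 : i % (q.length + 1) + 1 < q.length + 1 := by omega
    rw [key, Nat.mod_eq_of_lt h2]
    rw [List.getElem?_append_left hlt]
    simp

-- MAIN: A's mod-indexed match count equals B's per-position stride-count sum
theorem pvMain : ∀ (xs p : List Int), 0 < p.length →
    pvACount xs p = pvT xs p.length 0 p := by
  intro xs
  induction xs with
  | nil =>
    intro p hp
    simp [pvACount, pvT_nil]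
  | cons x xs ih =>
    intro p hp
    cases p with
    | nil => simp at hp
    | cons g q =>
      -- A side: split off index 0, rotate the pattern for the rest
      have hA : pvACount (x :: xs) (g :: q)
          = (if g == x then 1 else 0) + pvACount xs (q ++ [g]) := by
        simp only [pvACount, List.length_cons, List.range_succ_eq_map, List.countP_cons,
          List.countP_map]
        have hc0 : ((PySem.List.pyGet? (g :: q) (↑(0 % (q.length + 1)) : Int)).getD 0
            == (PySem.List.pyGet? (x :: xs) (↑(0 : Nat) : Int)).getD 0) = (g == x) := by
          rw [Nat.zero_mod]
          rw [PySem.List.pyGet?_natCast (g :: q) 0, PySem.List.pyGet?_natCast (x :: xs) 0]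
          rfl
        have hcs : ∀ i : Nat,
            ((fun i => (PySem.List.pyGet? (g :: q) (↑(i % (q.length + 1)) : Int)).getD 0
                == (PySem.List.pyGet? (x :: xs) (↑i : Int)).getD 0) ∘ Nat.succ) i
            = ((PySem.List.pyGet? (q ++ [g]) (↑(i % (q ++ [g]).length) : Int)).getD 0
                == (PySem.List.pyGet? xs (↑i : Int)).getD 0) := by
          intro i
          simp only [Function.comp_apply]
          rw [PySem.List.pyGet?_natCast, PySem.List.pyGet?_natCast,
            PySem.List.pyGet?_natCast, PySem.List.pyGet?_natCast]
          rw [List.length_append, List.length_singleton, ← pvRotGet q g i]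
          rfl
        rw [funext hcs]
        rw [hc0]
        push_cast
        by_cases hgx : g == x <;> simp [hgx] <;> ring
      -- B side: peel position 0, shift, and append the head at the back
      have hB : pvT (x :: xs) (q.length + 1) 0 (g :: q)
          = (if g == x then 1 else 0) + pvT xs (q ++ [g]).length 0 (q ++ [g]) := by
        show ((pvStride (x :: xs) 0 (q.length + 1)).count g : Int)
            + pvT (x :: xs) (q.length + 1) 1 q = _
        rw [pvT_shift x xs (q.length + 1) q 0]
        show ((x :: pvStride xs (q.length + 1 - 1) (q.length + 1)).count g : Int) + _ = _
        rw [List.count_cons]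
        rw [List.length_append, List.length_singleton]
        rw [pvT_append xs (q.length + 1) q g 0]
        simp only [Nat.zero_add, Nat.add_sub_cancel]
        have hbc : (x == g) = (g == x) := by
          by_cases h : g = x
          · subst h; rfl
          · have h1 : (x == g) = false := by simp [bne, h]; intro hc; exact h hc.symm
            have h2 : (g == x) = false := by simp [h]
            rw [h1, h2]
        rw [hbc]
        push_cast
        by_cases hgx : g == x <;> simp [hgx] <;> ring
      simp only [List.length_cons]
      rw [hA, hB, ih (q ++ [g]) (by simp)]

-- B's enumerate-fold computes pvT
theorem pvB_fold (answers : List Int) (L : Nat) (hL : 0 < L) :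
    ∀ (q : List Int) (s : Nat) (a : Int),
    (PySem.List.enumerate q (↑s : Int)).foldl
      (fun acc jg =>
        acc + (((PySem.List.slice? answers (some jg.1) none (↑L : Int)).getD []).count jg.2 : Int))
      a = a + pvT answers L s q := by
  intro q
  induction q with
  | nil => intro s a; simp [PySem.List.enumerate_nil, pvT]
  | cons g q ih =>
    intro s a
    rw [PySem.List.enumerate_cons]
    simp only [List.foldl_cons]
    have hcast : ((↑s : Int) + 1) = (↑(s + 1) : Nat) := by push_cast; ring
    rw [hcast, ih (s + 1), pvSlice_eq_stride answers s L hL]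
    simp only [Option.getD_some, pvT]
    ring

-- final assembly: A's three appended singletons equal B's range(3) collect loop
set_option maxRecDepth 8000 in
set_option maxHeartbeats 2000000 in
theorem pvAssemble (s1 s2 s3 : Int) :
    ((if max s1 (max s2 s3) == s1 then [1] else []) ++
      (if max s1 (max s2 s3) == s2 then [2] else [])) ++
      (if max s1 (max s2 s3) == s3 then [3] else [])
    = (PySem.List.pyRange 0 3 1).foldl
        (fun acc i => if (PySem.List.pyGet? [s1, s2, s3] i).getD 0
            == ((PySem.List.max? [s1, s2, s3] (fun y => y)).getD 0)
          then acc ++ [i + 1] else acc) ([] : List Int) := by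
  have hr : PySem.List.pyRange 0 3 1 = [0, 1, 2] := by decide
  have hm : PySem.List.max? [s1, s2, s3] (fun y => y) = some (max (max s1 s2) s3) := by
    rw [PySem.List.max?_id_cons]; rfl
  have g0 : PySem.List.pyGet? [s1, s2, s3] 0 = some s1 := rfl
  have g1 : PySem.List.pyGet? [s1, s2, s3] 1 = some s2 := rfl
  have g2 : PySem.List.pyGet? [s1, s2, s3] 2 = some s3 := rfl
  rw [hr]
  simp only [List.foldl_cons, List.foldl_nil, g0, g1, g2, hm, Option.getD_some,
    beq_iff_eq, max_def]
  norm_num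
  split_ifs <;> first | rfl | (simp; try omega) | omega

-- each pattern's B-fold equals its A-count
theorem pvScore_bridge (answers p : List Int) (L : Nat) (hLp : p.length = L) (hL : 0 < L) :
    (PySem.List.enumerate p 0).foldl
      (fun s jg =>
        s + (((PySem.List.slice? answers (some jg.1) none (↑p.length : Int)).getD []).count jg.2 : Int))
      0 = pvACount answers p := by
  subst hLp
  have h := pvB_fold answers p.length hL p 0 0
  rw [pvMain answers p hL]
  simpa using h

-- A's tuple fold splits into the three per-pattern counts
theorem pvA_as_counts (answers : List Int) :
    solution answers
      = ((if max (pvACount answers [1,2,3,4,5])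
              (max (pvACount answers [2,1,2,3,2,4,2,5]) (pvACount answers [3,3,1,1,2,2,4,4,5,5]))
            == pvACount answers [1,2,3,4,5] then [1] else []) ++
         (if max (pvACount answers [1,2,3,4,5])
              (max (pvACount answers [2,1,2,3,2,4,2,5]) (pvACount answers [3,3,1,1,2,2,4,4,5,5]))
            == pvACount answers [2,1,2,3,2,4,2,5] then [2] else [])) ++
        (if max (pvACount answers [1,2,3,4,5])
              (max (pvACount answers [2,1,2,3,2,4,2,5]) (pvACount answers [3,3,1,1,2,2,4,4,5,5]))
            == pvACount answers [3,3,1,1,2,2,4,4,5,5] then [3] else []) := by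
  have hsplit : (List.range answers.length).foldl (fun (acc : Int × Int × Int) (i : Nat) =>
        ((if (PySem.List.pyGet? ([1,2,3,4,5] : List Int) (↑(i % 5) : Int)).getD 0
              == (PySem.List.pyGet? answers (↑i : Int)).getD 0 then acc.1 + 1 else acc.1),
         (if (PySem.List.pyGet? ([2,1,2,3,2,4,2,5] : List Int) (↑(i % 8) : Int)).getD 0
              == (PySem.List.pyGet? answers (↑i : Int)).getD 0 then acc.2.1 + 1 else acc.2.1),
         (if (PySem.List.pyGet? ([3,3,1,1,2,2,4,4,5,5] : List Int) (↑(i % 10) : Int)).getD 0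
              == (PySem.List.pyGet? answers (↑i : Int)).getD 0 then acc.2.2 + 1 else acc.2.2)))
      (0, 0, 0)
      = (pvACount answers [1,2,3,4,5], pvACount answers [2,1,2,3,2,4,2,5],
         pvACount answers [3,3,1,1,2,2,4,4,5,5]) := by
    rw [pvFoldl_prod3
      (fun (s : Int) (i : Nat) => if (PySem.List.pyGet? ([1,2,3,4,5] : List Int) (↑(i % 5) : Int)).getD 0
          == (PySem.List.pyGet? answers (↑i : Int)).getD 0 then s + 1 else s)
      (fun (s : Int) (i : Nat) => if (PySem.List.pyGet? ([2,1,2,3,2,4,2,5] : List Int) (↑(i % 8) : Int)).getD 0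
          == (PySem.List.pyGet? answers (↑i : Int)).getD 0 then s + 1 else s)
      (fun (s : Int) (i : Nat) => if (PySem.List.pyGet? ([3,3,1,1,2,2,4,4,5,5] : List Int) (↑(i % 10) : Int)).getD 0
          == (PySem.List.pyGet? answers (↑i : Int)).getD 0 then s + 1 else s)
      (List.range answers.length) 0 0 0]
    rw [PySem.List.foldl_if_add_one, PySem.List.foldl_if_add_one, PySem.List.foldl_if_add_one]
    show (_, _, _) = (_, _, _)
    refine Prod.ext ?_ (Prod.ext ?_ ?_) <;> simp [pvACount]
  show ((fun s : Int × Int × Int =>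
      ((if max s.1 (max s.2.1 s.2.2) == s.1 then [1] else []) ++
        (if max s.1 (max s.2.1 s.2.2) == s.2.1 then [2] else [])) ++
        (if max s.1 (max s.2.1 s.2.2) == s.2.2 then [3] else []))
    ((List.range answers.length).foldl (fun (acc : Int × Int × Int) (i : Nat) =>
        ((if (PySem.List.pyGet? ([1,2,3,4,5] : List Int) (↑(i % 5) : Int)).getD 0
              == (PySem.List.pyGet? answers (↑i : Int)).getD 0 then acc.1 + 1 else acc.1),
         (if (PySem.List.pyGet? ([2,1,2,3,2,4,2,5] : List Int) (↑(i % 8) : Int)).getD 0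
              == (PySem.List.pyGet? answers (↑i : Int)).getD 0 then acc.2.1 + 1 else acc.2.1),
         (if (PySem.List.pyGet? ([3,3,1,1,2,2,4,4,5,5] : List Int) (↑(i % 10) : Int)).getD 0
              == (PySem.List.pyGet? answers (↑i : Int)).getD 0 then acc.2.2 + 1 else acc.2.2)))
      (0, 0, 0))) = _
  rw [hsplit]

-- ===== VERDICT (by name: the statement is the Claim_ definition above) =====
theorem solution_spec : Claim_equal_solution := by
  intro answers _
  show solution answers = solution_alt answers
  rw [pvA_as_counts answers, pvAssemble]
  show _ = (PySem.List.pyRange 0 3 1).foldl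
    (fun acc i => if (PySem.List.pyGet?
        [(PySem.List.enumerate ([1,2,3,4,5] : List Int) 0).foldl
            (fun s jg => s + (((PySem.List.slice? answers (some jg.1) none
              (↑([1,2,3,4,5] : List Int).length : Int)).getD []).count jg.2 : Int)) 0,
         (PySem.List.enumerate ([2,1,2,3,2,4,2,5] : List Int) 0).foldl
            (fun s jg => s + (((PySem.List.slice? answers (some jg.1) none
              (↑([2,1,2,3,2,4,2,5] : List Int).length : Int)).getD []).count jg.2 : Int)) 0,
         (PySem.List.enumerate ([3,3,1,1,2,2,4,4,5,5] : List Int) 0).foldl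
            (fun s jg => s + (((PySem.List.slice? answers (some jg.1) none
              (↑([3,3,1,1,2,2,4,4,5,5] : List Int).length : Int)).getD []).count jg.2 : Int)) 0] i).getD 0
        == ((PySem.List.max?
          [(PySem.List.enumerate ([1,2,3,4,5] : List Int) 0).foldl
              (fun s jg => s + (((PySem.List.slice? answers (some jg.1) none
                (↑([1,2,3,4,5] : List Int).length : Int)).getD []).count jg.2 : Int)) 0,
           (PySem.List.enumerate ([2,1,2,3,2,4,2,5] : List Int) 0).foldl
              (fun s jg => s + (((PySem.List.slice? answers (some jg.1) none
                (↑([2,1,2,3,2,4,2,5] : List Int).length : Int)).getD []).count jg.2 : Int)) 0,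
           (PySem.List.enumerate ([3,3,1,1,2,2,4,4,5,5] : List Int) 0).foldl
              (fun s jg => s + (((PySem.List.slice? answers (some jg.1) none
                (↑([3,3,1,1,2,2,4,4,5,5] : List Int).length : Int)).getD []).count jg.2 : Int)) 0]
          (fun y => y)).getD 0)
      then acc ++ [i + 1] else acc) []
  rw [pvScore_bridge answers [1,2,3,4,5] 5 rfl (by norm_num),
    pvScore_bridge answers [2,1,2,3,2,4,2,5] 8 rfl (by norm_num),
    pvScore_bridge answers [3,3,1,1,2,2,4,4,5,5] 10 rfl (by norm_num)]
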